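-- pv_equiv track=rewrite | github.com/Shirahzilber12/corona | heap.py | change_increase_key
-- ===== SOURCE A (Python) =====
-- def change_increase_key(A, i, key, d):
--     if key < A[i]:
--         raise ValueError("new key is smaller than current key")
--     A[i] = key
--     while i > 0 and A[(i-1)//d] < A[i]:
--         A[i], A[(i-1)//d] = A[(i-1)//d], A[i]
--         i = (i-1) // d
--     return A
-- ===== SOURCE B (Python) =====
-- def change_increase_key(A, i, key, d):
--     if key < A[i]:
--         raise ValueError("new key is smaller than current key")
--     # stage 1: materialise the ancestor chain from i up to the root
--     path = [i]
--     while path[-1] > 0: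
--         path.append((path[-1] - 1) // d)
--     # stage 2: how many ancestors on the chain are strictly smaller than key
--     k = 0
--     while k + 1 < len(path) and A[path[k + 1]] < key:
--         k += 1
--     # stage 3: rotate those ancestors one edge down the chain; key lands at path[k]
--     for j in range(k):
--         A[path[j]] = A[path[j + 1]]
--     A[path[k]] = key
--     return A
-- ===== Notes on version B (the rewrite author's own statement) =====
-- stated objective: alternative
-- what changed: B replaces A's single fused sift-up swap loop with three staged passes over an explicit ancestor-path list: build the chain of parent indices, scan it once to find the key's final slot, then rotate the smaller ancestors one edge down and write the key once.
import Mathlib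
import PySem

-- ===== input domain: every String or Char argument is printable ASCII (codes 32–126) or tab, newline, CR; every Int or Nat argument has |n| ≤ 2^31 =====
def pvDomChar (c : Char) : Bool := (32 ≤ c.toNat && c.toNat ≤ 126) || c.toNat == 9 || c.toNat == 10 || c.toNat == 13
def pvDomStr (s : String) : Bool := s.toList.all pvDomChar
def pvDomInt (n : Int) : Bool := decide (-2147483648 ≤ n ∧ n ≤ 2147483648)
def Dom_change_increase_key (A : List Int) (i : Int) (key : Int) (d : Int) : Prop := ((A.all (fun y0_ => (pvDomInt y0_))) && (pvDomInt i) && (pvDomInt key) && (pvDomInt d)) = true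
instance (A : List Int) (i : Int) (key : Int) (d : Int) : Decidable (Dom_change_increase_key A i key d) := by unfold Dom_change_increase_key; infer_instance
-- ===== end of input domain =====

-- B replaces A's fused sift-up swap loop with three staged passes over an explicit
-- ancestor-path list (build the chain, scan it for the key's final slot, rotate values
-- along it); same ValueError guard, same in-place mutation of the list in Python; the
-- equivalence proved here is about the return value.

-- termination measure for A's loop and B's path builder: (i-1)//d has smaller toNat than i
lemma pv_parent_nonpos (i d : Int) (h : 0 < i) (hd : d < 0) :
    PySem.Int.floordiv (i - 1) d ≤ 0 := by
  have h1 := PySem.Int.floordiv_mul_add_mod (i - 1) d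
  have h3 := (PySem.Int.mod_neg_bounds (a := i - 1) hd).2
  by_contra hc
  have h4 : PySem.Int.floordiv (i - 1) d * d ≤ 1 * d :=
    mul_le_mul_of_nonpos_right (by omega) (le_of_lt hd)
  linarith

lemma pv_parent_toNat_lt (i d : Int) (h : 0 < i) :
    (PySem.Int.floordiv (i - 1) d).toNat < i.toNat := by
  rcases lt_trichotomy d 0 with hd | hd | hd
  · have := pv_parent_nonpos i d h hd
    omega
  · subst hd
    have h0 : PySem.Int.floordiv (i - 1) 0 = 0 := Int.fdiv_zero _
    omega
  · have he : PySem.Int.floordiv (i - 1) d = (i - 1) / d :=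
      PySem.Int.floordiv_eq_ediv_of_pos hd
    have h1 : 0 ≤ (i - 1) / d := Int.ediv_nonneg (by omega) (le_of_lt hd)
    have h2 : (i - 1) / d ≤ i - 1 := Int.ediv_le_self _ (by omega)
    omega

-- ===== PORT A =====
-- the while loop of A: swap A[i] with the parent A[(i-1)//d] while it is smaller
def siftA (A : List Int) (i : Int) (d : Int) : List Int :=
  if h : 0 < i ∧ PySem.List.pyGetD A (PySem.Int.floordiv (i - 1) d) 0 < PySem.List.pyGetD A i 0 then
    siftA
      (PySem.List.pySetD
        (PySem.List.pySetD A i (PySem.List.pyGetD A (PySem.Int.floordiv (i - 1) d) 0))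
        (PySem.Int.floordiv (i - 1) d) (PySem.List.pyGetD A i 0))
      (PySem.Int.floordiv (i - 1) d) d
  else A
termination_by i.toNat
decreasing_by exact pv_parent_toNat_lt i d h.1

-- port of A; the 'key < A[i]' branch raises ValueError in Python (excluded by Pre_)
def change_increase_key (A : List Int) (i : Int) (key : Int) (d : Int) : List Int :=
  if key < PySem.List.pyGetD A i 0 then A
  else siftA (PySem.List.pySetD A i key) i d

-- ===== PORT B =====
-- stage 1 of B: the ancestor chain i, (i-1)//d, … down to the first non-positive index
def pathB (i d : Int) : List Int :=
  if h : 0 < i then i :: pathB (PySem.Int.floordiv (i - 1) d) d else [i]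
termination_by i.toNat
decreasing_by exact pv_parent_toNat_lt i d h

-- stage 2 of B: the while loop counting ancestors on the chain strictly smaller than key
def findK (A : List Int) (path : List Int) (key : Int) : Nat :=
  match path with
  | _ :: y :: rest =>
      if PySem.List.pyGetD A y 0 < key then findK A (y :: rest) key + 1 else 0
  | _ => 0

-- stage 3 of B: the for loop A[path[j]] = A[path[j+1]] for j < k, then A[path[k]] = key
def rotateB (A : List Int) (path : List Int) (k : Nat) (key : Int) : List Int :=
  match k, path with
  | 0, x :: _ => PySem.List.pySetD A x key
  | Nat.succ k', x :: y :: rest =>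
      rotateB (PySem.List.pySetD A x (PySem.List.pyGetD A y 0)) (y :: rest) k' key
  | _, _ => A

-- port of B; same guard (ValueError in Python, excluded by Pre_)
def change_increase_key_alt (A : List Int) (i : Int) (key : Int) (d : Int) : List Int :=
  if key < PySem.List.pyGetD A i 0 then A
  else rotateB A (pathB i d) (findK A (pathB i d) key) key

-- ===== PRECONDITION & SPEC =====
-- Pre_ excludes exactly the inputs where A raises: i out of range (IndexError),
-- key < A[i] (ValueError), and 0 < i with d = 0 (ZeroDivisionError in the loop test).
def Pre_change_increase_key (A : List Int) (i : Int) (key : Int) (d : Int) : Prop :=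
  PySem.Raise.InRange A.length i ∧ PySem.List.pyGetD A i 0 ≤ key ∧ (0 < i → d ≠ 0)
instance (A : List Int) (i : Int) (key : Int) (d : Int) : Decidable (Pre_change_increase_key A i key d) := by unfold Pre_change_increase_key; infer_instance

def pvWitness_change_increase_key : List Int × Int × Int × Int := ([1, 2, 3], 1, 5, 2)

def Spec_change_increase_key (A : List Int) (i : Int) (key : Int) (d : Int) (out : List Int) : Prop := out = change_increase_key_alt A i key d
instance (A : List Int) (i : Int) (key : Int) (d : Int) (out : List Int) : Decidable (Spec_change_increase_key A i key d out) := by unfold Spec_change_increase_key; infer_instance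

-- ===== CLAIM (what is proved, stated in full; the proofs are below) =====
def Claim_equal_change_increase_key : Prop := ∀ (A : List Int) (i : Int) (key : Int) (d : Int), Dom_change_increase_key A i key d → Pre_change_increase_key A i key d → Spec_change_increase_key A i key d (change_increase_key A i key d)

-- ===== LEMMAS AND PROOFS =====

-- proof intermediate: the hole-style sift-up; both ports are shown equal to it
def siftB (A : List Int) (child : Int) (key : Int) (d : Int) : List Int :=
  if h : 0 < child ∧ PySem.List.pyGetD A (PySem.Int.floordiv (child - 1) d) 0 < key then
    siftB (PySem.List.pySetD A child (PySem.List.pyGetD A (PySem.Int.floordiv (child - 1) d) 0))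
      (PySem.Int.floordiv (child - 1) d) key d
  else PySem.List.pySetD A child key
termination_by child.toNat
decreasing_by exact pv_parent_toNat_lt child d h.1

-- the slot in [0, n) a Python index j addresses (n = length, j in range)
def pvSlot (n : Nat) (j : Int) : Nat := if 0 ≤ j then j.toNat else n - (-j).toNat

lemma pvSlot_lt (n : Nat) (j : Int) (hr : PySem.Raise.InRange n j) : pvSlot n j < n := by
  rcases hr with ⟨h1, h2⟩
  unfold pvSlot
  split <;> omega

lemma pv_get_slot (A : List Int) (j : Int) (hr : PySem.Raise.InRange A.length j) :
    PySem.List.pyGetD A j 0 = A.getD (pvSlot A.length j) 0 := by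
  rcases hr with ⟨h1, h2⟩
  simp only [PySem.List.pyGetD, PySem.List.pyGet?, PySem.List.pyIdx?, pvSlot]
  split <;> simp [List.getD_eq_getElem?_getD]

lemma pv_set_slot (A : List Int) (j : Int) (v : Int) (hr : PySem.Raise.InRange A.length j) :
    PySem.List.pySetD A j v = A.set (pvSlot A.length j) v := by
  rcases hr with ⟨h1, h2⟩
  simp only [PySem.List.pySetD, PySem.List.pySet?, PySem.List.pyIdx?, pvSlot]
  split <;> simp

-- bounds on the parent index p = (i-1)//d for 0 < i: p < i always, and -(i-1) ≤ p
lemma pv_parent_lb (i d : Int) (h : 0 < i) (hd : d < 0) :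
    -(i - 1) ≤ PySem.Int.floordiv (i - 1) d := by
  have h1 := PySem.Int.floordiv_mul_add_mod (i - 1) d
  have h2 := (PySem.Int.mod_neg_bounds (a := i - 1) hd).1
  by_contra hc
  have h4 : (-i) * d ≤ PySem.Int.floordiv (i - 1) d * d :=
    mul_le_mul_of_nonpos_right (by omega) (le_of_lt hd)
  have h6 : 0 ≤ (i - 1) * (-d - 1) := mul_nonneg (by omega) (by omega)
  nlinarith

lemma pv_parent_inRange (A : List Int) (i d : Int) (h : 0 < i)
    (hr : PySem.Raise.InRange A.length i) :
    PySem.Raise.InRange A.length (PySem.Int.floordiv (i - 1) d) := by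
  rcases hr with ⟨h1, h2⟩
  have hlt := pv_parent_toNat_lt i d h
  constructor
  · rcases lt_trichotomy d 0 with hd | hd | hd
    · have := pv_parent_lb i d h hd
      omega
    · subst hd
      have h0 : PySem.Int.floordiv (i - 1) 0 = 0 := Int.fdiv_zero _
      omega
    · have he : PySem.Int.floordiv (i - 1) d = (i - 1) / d :=
        PySem.Int.floordiv_eq_ediv_of_pos hd
      have := Int.ediv_nonneg (a := i - 1) (by omega) (le_of_lt hd)
      omega
  · omega

-- A's swap loop started after writing key at i equals the hole loop on the original list
lemma pv_sift_eq (n : Nat) : ∀ (A : List Int) (i key d : Int), i.toNat ≤ n →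
    PySem.Raise.InRange A.length i →
    siftA (PySem.List.pySetD A i key) i d = siftB A i key d := by
  induction n with
  | zero =>
    intro A i key d hn hr
    have hi : ¬ 0 < i := by omega
    rw [siftA, siftB]
    simp [hi]
  | succ n ih =>
    intro A i key d hn hr
    by_cases hi : 0 < i
    · have hlen : i.toNat < A.length := by rcases hr with ⟨h1, h2⟩; omega
      set p := PySem.Int.floordiv (i - 1) d with hp
      have hpr : PySem.Raise.InRange A.length p := pv_parent_inRange A i d hi hr
      have hptoNat : p.toNat < i.toNat := pv_parent_toNat_lt i d hi
      have hsi : pvSlot A.length i = i.toNat := by unfold pvSlot; simp [le_of_lt hi]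
      have hsp : pvSlot A.length p < A.length := pvSlot_lt _ _ hpr
      have hA' : PySem.List.pySetD A i key = A.set i.toNat key := by
        rw [pv_set_slot A i key hr, hsi]
      have hgetI : PySem.List.pyGetD (PySem.List.pySetD A i key) i 0 = key := by
        rw [pv_get_slot _ i (by simpa [PySem.List.length_pySetD] using hr), hA']
        simp [List.length_set, hsi, hlen, List.getElem_set_self]
      by_cases halias : pvSlot A.length p = i.toNat
      · -- the parent index addresses the same slot as i (negative p wrapping onto i)
        have hpneg : p < 0 := by
          by_contra hge
          rw [not_lt] at hge
          have : pvSlot A.length p = p.toNat := by unfold pvSlot; simp [hge]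
          omega
        have hgetP' : PySem.List.pyGetD (PySem.List.pySetD A i key) p 0 = key := by
          rw [pv_get_slot _ p (by simpa [PySem.List.length_pySetD] using hpr), hA']
          simp only [List.length_set]
          rw [halias]
          simp [hlen, List.getElem_set_self]
        rw [siftA]
        simp only [hgetI, hgetP', ← hp, lt_irrefl, and_false, dite_false]
        rw [siftB]
        by_cases hc : PySem.List.pyGetD A p 0 < key
        · simp only [← hp, hi, hc, and_self, dite_true]
          have hgetP : PySem.List.pyGetD A p 0 = A[i.toNat] := by
            rw [pv_get_slot A p hpr, halias, List.getD_eq_getElem _ _ hlen]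
          have hset : PySem.List.pySetD A i (PySem.List.pyGetD A p 0) = A := by
            rw [pv_set_slot A i _ hr, hsi, hgetP, List.set_getElem_self hlen]
          rw [hset, siftB]
          have hpneg' : ¬ 0 < p := by omega
          simp only [hpneg', false_and, dite_false]
          rw [pv_set_slot A p key hpr, halias, hA']
        · simp only [← hp, hc, and_false, dite_false]
      · -- distinct slots: the write of key at i does not change the parent read
        have hgetP' : PySem.List.pyGetD (PySem.List.pySetD A i key) p 0 =
            PySem.List.pyGetD A p 0 := by
          rw [pv_get_slot _ p (by simpa [PySem.List.length_pySetD] using hpr), hA',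
            pv_get_slot A p hpr]
          simp only [List.length_set]
          rw [List.getD_eq_getElem _ _ (by simpa using hsp),
            List.getD_eq_getElem _ _ hsp, List.getElem_set_ne (by omega)]
        by_cases hc : PySem.List.pyGetD A p 0 < key
        · rw [siftA]
          simp only [hgetI, hgetP', ← hp, hi, hc, and_self, dite_true]
          rw [siftB]
          simp only [← hp, hi, hc, and_self, dite_true]
          have hswap : PySem.List.pySetD (PySem.List.pySetD A i key) i
              (PySem.List.pyGetD A p 0) =
              PySem.List.pySetD A i (PySem.List.pyGetD A p 0) := by
            rw [hA', pv_set_slot _ i _ (by simpa using hr),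
              pv_set_slot A i _ hr]
            simp only [List.length_set, hsi]
            rw [List.set_set]
          rw [hswap]
          exact ih (PySem.List.pySetD A i (PySem.List.pyGetD A p 0)) p key d
            (by omega) (by simpa [PySem.List.length_pySetD] using hpr)
        · rw [siftA]
          simp only [hgetI, hgetP', ← hp, hc, and_false, dite_false]
          rw [siftB]
          simp only [← hp, hc, and_false, dite_false]
    · rw [siftA, siftB]
      simp [hi]

-- pathB always starts with its argument
lemma pathB_cons (i d : Int) : ∃ t, pathB i d = i :: t := by
  rw [pathB]
  split <;> exact ⟨_, rfl⟩

-- with d ≥ 0 and i ≥ 0 every chain element lies in [0, i]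
lemma pathB_bounds (n : Nat) : ∀ (i d : Int), i.toNat ≤ n → 0 ≤ d → 0 ≤ i →
    ∀ y ∈ pathB i d, 0 ≤ y ∧ y ≤ i := by
  induction n with
  | zero =>
    intro i d hn hd hi y hy
    have hi0 : ¬ 0 < i := by omega
    rw [pathB] at hy
    simp [hi0] at hy
    omega
  | succ n ih =>
    intro i d hn hd hi y hy
    by_cases hi0 : 0 < i
    · rw [pathB] at hy
      simp only [hi0, dite_true, List.mem_cons] at hy
      rcases hy with rfl | hy
      · omega
      · set p := PySem.Int.floordiv (i - 1) d with hp
        have hp0 : 0 ≤ p := by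
          rcases eq_or_lt_of_le hd with hd0 | hd0
          · rw [hp, ← hd0]
            have : PySem.Int.floordiv (i - 1) 0 = 0 := Int.fdiv_zero _
            omega
          · rw [hp, PySem.Int.floordiv_eq_ediv_of_pos hd0]
            exact Int.ediv_nonneg (by omega) (le_of_lt hd0)
        have hplt := pv_parent_toNat_lt i d hi0
        have := ih p d (by omega) hd hp0 y hy
        omega
    · rw [pathB] at hy
      simp [hi0] at hy
      omega

-- findK only reads the tail of the chain
lemma findK_congr (A₁ A₂ : List Int) (key : Int) : ∀ (path : List Int),
    (∀ y ∈ path.tail, PySem.List.pyGetD A₁ y 0 = PySem.List.pyGetD A₂ y 0) →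
    findK A₁ path key = findK A₂ path key := by
  intro path
  induction path with
  | nil => intro _; rfl
  | cons x t iht =>
    intro hrd
    cases t with
    | nil => rfl
    | cons y rest =>
      have hy : PySem.List.pyGetD A₁ y 0 = PySem.List.pyGetD A₂ y 0 :=
        hrd y (by simp)
      rw [findK, findK, hy]
      split
      · rw [iht (by intro z hz; exact hrd z (by simp at hz ⊢; exact Or.inr hz))]
      · rfl

-- B's three stages compose to the hole-style sift-up
lemma pv_alt_eq (n : Nat) : ∀ (A : List Int) (i key d : Int), i.toNat ≤ n →
    PySem.Raise.InRange A.length i →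
    rotateB A (pathB i d) (findK A (pathB i d) key) key = siftB A i key d := by
  induction n with
  | zero =>
    intro A i key d hn hr
    have hi : ¬ 0 < i := by omega
    rw [pathB, siftB]
    simp [hi, findK, rotateB]
  | succ n ih =>
    intro A i key d hn hr
    by_cases hi : 0 < i
    · set p := PySem.Int.floordiv (i - 1) d with hp
      obtain ⟨t, ht⟩ := pathB_cons p d
      have hpath : pathB i d = i :: p :: t := by rw [pathB]; simp [hi, ← hp, ht]
      have hpr : PySem.Raise.InRange A.length p := pv_parent_inRange A i d hi hr
      have hptoNat : p.toNat < i.toNat := pv_parent_toNat_lt i d hi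
      rw [hpath, findK]
      by_cases hc : PySem.List.pyGetD A p 0 < key
      · simp only [hc, if_true]
        rw [rotateB]
        set A' := PySem.List.pySetD A i (PySem.List.pyGetD A p 0) with hA'
        have hlenA' : A'.length = A.length := by
          rw [hA']; exact PySem.List.length_pySetD ..
        have hprA' : PySem.Raise.InRange A'.length p := by rw [hlenA']; exact hpr
        have hfk : findK A (p :: t) key = findK A' (p :: t) key := by
          by_cases hp0 : 0 < p
          · -- d must be nonnegative here: a positive parent rules out d < 0
            have hd0 : 0 ≤ d := by
              by_contra hdneg
              have := pv_parent_nonpos i d hi (by omega)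
              omega
            apply findK_congr
            intro y hy
            have hyt : y ∈ pathB p d := by rw [ht]; exact List.mem_cons_of_mem _ hy
            have hyb := pathB_bounds p.toNat p d le_rfl hd0 (by omega) y hyt
            have hyr : PySem.Raise.InRange A.length y := by
              rcases hr with ⟨h1, h2⟩; constructor <;> omega
            have hyrA' : PySem.Raise.InRange A'.length y := by rw [hlenA']; exact hyr
            rw [pv_get_slot A y hyr, pv_get_slot A' y hyrA', hlenA']
            have hsy : pvSlot A.length y = y.toNat := by unfold pvSlot; simp [hyb.1]
            have hsi : pvSlot A.length i = i.toNat := by unfold pvSlot; simp [le_of_lt hi]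
            have hylt : y.toNat < A.length := by rcases hyr with ⟨h1, h2⟩; omega
            have hilt : i.toNat < A.length := by rcases hr with ⟨h1, h2⟩; omega
            have hA'set : A' = A.set i.toNat (PySem.List.pyGetD A p 0) := by
              rw [hA', pv_set_slot A i _ hr, hsi]
            rw [hA'set, hsy,
              List.getD_eq_getElem _ _ hylt,
              List.getD_eq_getElem _ _
                (show y.toNat < (A.set i.toNat (PySem.List.pyGetD A p 0)).length by
                  simpa using hylt),
              List.getElem_set_ne (by omega)]
          · -- non-positive parent: the chain ends, t = [], findK is 0 on both sides
            have : t = [] := by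
              rw [pathB] at ht
              simp [hp0] at ht
              exact ht
            subst this
            rfl
        rw [hfk, ← ht, ih A' p key d (by omega) hprA']
        conv_rhs => rw [siftB]
        simp only [hi, ← hp, hc, and_self, dite_true, ← hA']
      · simp only [hc, if_false]
        rw [rotateB, siftB]
        simp only [hi, ← hp, hc, and_false, dite_false]
    · rw [pathB, siftB]
      simp [hi, findK, rotateB]

-- ===== VERDICT (by name: the statement is the Claim_ definition above) =====
theorem change_increase_key_spec : Claim_equal_change_increase_key := by
  intro A i key d _ hpre
  rcases hpre with ⟨hr, hle, _⟩
  unfold Spec_change_increase_key change_increase_key change_increase_key_alt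
  have hng : ¬ key < PySem.List.pyGetD A i 0 := not_lt.mpr hle
  simp only [hng, if_false]
  rw [pv_alt_eq i.toNat A i key d le_rfl hr]
  exact pv_sift_eq i.toNat A i key d le_rfl hr
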